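-- pv_equiv track=rewrite | github.com/RicodesS/MINR | Algorithm Design/Homework/hw1/1_1.py | max_palindhrome
-- ===== SOURCE A (Python) =====
-- def max_palindhrome(w, n,subs):
-- 	max_length = 0
-- 	max_pal = ""
-- 	x = len(subs)
--
-- 	for j in range(0, x):
-- 		y = len(subs[j])
-- 		for i in range(0, y):
-- 			if (n - y) > 0:
-- 				if subs[j][i] == subs[j][y-(i+1)]:
-- 					continue
-- 				else:
-- 					break
-- 			if y > max_length:
-- 				max_length = y
-- 				max_pal = subs[j]
--
--
-- 	return max_pal
-- ===== SOURCE B (Python) =====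
-- def max_palindhrome(w, n, subs):
--     # A's palindrome character test is dead code: the result is only ever
--     # updated for substrings with len >= n, so the answer is simply the first
--     # longest substring of length >= n.  One plain pass, no nested loop.
--     max_length = 0
--     max_pal = ""
--     for s in subs:
--         if len(s) >= n and len(s) > max_length:
--             max_length = len(s)
--             max_pal = s
--     return max_pal
-- ===== Notes on version B (the rewrite author's own statement) =====
-- stated objective: simpler
-- what changed: A's inner character-by-character palindrome loop is dead code (the update branch is only reachable when len(s) >= n, where the palindrome test is skipped); B replaces the nested loops by a single pass over subs keeping the first longest substring with len(s) >= n.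
import Mathlib
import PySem

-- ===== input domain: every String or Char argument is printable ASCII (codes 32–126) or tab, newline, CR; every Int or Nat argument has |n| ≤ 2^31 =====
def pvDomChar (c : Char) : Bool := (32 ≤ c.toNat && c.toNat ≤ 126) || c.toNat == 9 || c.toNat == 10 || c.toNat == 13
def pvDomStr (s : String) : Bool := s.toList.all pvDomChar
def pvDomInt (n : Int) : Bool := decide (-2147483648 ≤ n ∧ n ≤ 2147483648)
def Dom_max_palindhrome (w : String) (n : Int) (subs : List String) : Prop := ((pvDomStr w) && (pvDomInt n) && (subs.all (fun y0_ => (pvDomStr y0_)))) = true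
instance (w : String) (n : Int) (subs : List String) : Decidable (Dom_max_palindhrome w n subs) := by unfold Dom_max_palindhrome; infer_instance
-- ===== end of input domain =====

-- B: A's nested palindrome loop is dead code (updates happen only when len(s) >= n,
-- where the character test is skipped), so B is a single pass keeping the first
-- longest substring of length >= n; simpler, same result.
-- ===== PORT A =====
-- inner 'for i in range(0, y)' loop of A, with break/continue as early return/recursion
def pvInnerA (n : Int) (s : String) (y : Int) : List Int → (Int × String) → (Int × String)
  | [], st => st
  | i :: rest, st =>
    if n - y > 0 then
      if PySem.List.pyGetD s.toList i ' ' = PySem.List.pyGetD s.toList (y - (i + 1)) ' ' then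
        pvInnerA n s y rest st            -- continue
      else
        st                                 -- break
    else
      pvInnerA n s y rest (if y > st.1 then (y, s) else st)

def max_palindhrome (w : String) (n : Int) (subs : List String) : String :=
  let x : Int := (subs.length : Int)
  ((PySem.List.pyRange 0 x 1).foldl
    (fun st j =>
      let s := PySem.List.pyGetD subs j ""
      let y := PySem.Str.len s
      pvInnerA n s y (PySem.List.pyRange 0 y 1) st)
    (0, "")).2

-- ===== PORT B =====
def max_palindhrome_alt (w : String) (n : Int) (subs : List String) : String :=
  (subs.foldl
    (fun st s =>
      if PySem.Str.len s ≥ n ∧ PySem.Str.len s > st.1 then (PySem.Str.len s, s) else st)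
    (0, "")).2

-- ===== PRECONDITION & SPEC =====
def Spec_max_palindhrome (w : String) (n : Int) (subs : List String) (out : String) : Prop := out = max_palindhrome_alt w n subs
instance (w : String) (n : Int) (subs : List String) (out : String) : Decidable (Spec_max_palindhrome w n subs out) := by unfold Spec_max_palindhrome; infer_instance

-- ===== CLAIM (what is proved, stated in full; the proofs are below) =====
def Claim_equal_max_palindhrome : Prop := ∀ (w : String) (n : Int) (subs : List String), Dom_max_palindhrome w n subs → Spec_max_palindhrome w n subs (max_palindhrome w n subs)

-- ===== LEMMAS AND PROOFS =====

-- ===== VERDICT (by name: the statement is the Claim_ definition above) =====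
-- when y < n the inner loop only compares characters and never touches the state
lemma pvInnerA_lt (n : Int) (s : String) (y : Int) (hy : n - y > 0) :
    ∀ (is : List Int) (st : Int × String), pvInnerA n s y is st = st := by
  intro is
  induction is with
  | nil => intro st; rfl
  | cons i rest ih =>
    intro st
    simp only [pvInnerA, if_pos hy]
    split
    · exact ih st
    · rfl

-- when y ≥ n and y no longer beats the stored max, the loop is a no-op
lemma pvInnerA_noupd (n : Int) (s : String) (y : Int) (hy : ¬ n - y > 0) (hle : ¬ y > (st : Int × String).1) :
    ∀ (is : List Int), pvInnerA n s y is st = st := by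
  intro is
  induction is with
  | nil => rfl
  | cons i rest ih =>
    simp only [pvInnerA, if_neg hy, if_neg hle]
    exact ih

-- one outer iteration of A equals one step of B, for states with nonnegative max_length
lemma pvStep_eq (n : Int) (s : String) (st : Int × String) (hst : 0 ≤ st.1) :
    pvInnerA n s (PySem.Str.len s) (PySem.List.pyRange 0 (PySem.Str.len s) 1) st =
      (if PySem.Str.len s ≥ n ∧ PySem.Str.len s > st.1 then (PySem.Str.len s, s) else st) := by
  set y := PySem.Str.len s with hy
  have hy0 : 0 ≤ y := by simp [hy, PySem.Str.len_eq]
  by_cases hlt : n - y > 0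
  · rw [pvInnerA_lt n s y hlt]
    have : ¬ (y ≥ n ∧ y > st.1) := by intro h; omega
    simp [this]
  · have hge : y ≥ n := by omega
    by_cases hz : y = 0
    · have hnil : PySem.List.pyRange 0 y 1 = [] := PySem.List.pyRange_one_eq_nil (by omega)
      have : ¬ (y ≥ n ∧ y > st.1) := by intro h; omega
      rw [hnil]
      simp [pvInnerA, this]
    · have hpos : (0 : Int) < y := by omega
      rw [PySem.List.pyRange_one_cons hpos]
      simp only [pvInnerA, if_neg hlt]
      by_cases hb : y > st.1
      · rw [if_pos hb, pvInnerA_noupd n s y hlt (by simp) _]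
        simp [hge, hb]
      · rw [if_neg hb, pvInnerA_noupd n s y hlt hb _]
        have : ¬ (y ≥ n ∧ y > st.1) := by intro h; exact hb h.2
        simp [this]

-- the two folds agree from any state with nonnegative max_length
lemma pvFold_eq (n : Int) :
    ∀ (subs : List String) (st : Int × String), 0 ≤ st.1 →
      subs.foldl (fun st s =>
          pvInnerA n s (PySem.Str.len s) (PySem.List.pyRange 0 (PySem.Str.len s) 1) st) st =
      subs.foldl (fun st s =>
          if PySem.Str.len s ≥ n ∧ PySem.Str.len s > st.1 then (PySem.Str.len s, s) else st) st := by
  intro subs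
  induction subs with
  | nil => intro st _; rfl
  | cons s rest ih =>
    intro st hst
    simp only [List.foldl_cons]
    rw [pvStep_eq n s st hst]
    apply ih
    split
    · simp [PySem.Str.len_eq]
    · exact hst

-- ===== VERDICT (by name: the statement is the Claim_ definition above) =====
theorem max_palindhrome_spec : Claim_equal_max_palindhrome := by
  intro w n subs _
  unfold Spec_max_palindhrome max_palindhrome max_palindhrome_alt
  dsimp only
  rw [PySem.List.foldl_pyRange_zero_pyGetD' subs ""
        (fun st s => pvInnerA n s (PySem.Str.len s) (PySem.List.pyRange 0 (PySem.Str.len s) 1) st)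
        (0, "")]
  rw [pvFold_eq n subs (0, "") (by norm_num)]
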